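-- pv_equiv track=rewrite | github.com/kody-w/UniversalDataConnectorAI | agents/cx_universal_data_connector.py | _check_tabular
-- ===== SOURCE A (Python) =====
-- from collections import Counter, defaultdict
--
-- def _check_tabular(lines):
--     """Check for tabular structure"""
--     delimiter_counts = defaultdict(list)
--
--     for line in lines[:50]:
--         if line.strip():
--             for delim in [',', '\t', '|', ';']:
--                 count = line.count(delim)
--                 if count > 0:
--                     delimiter_counts[delim].append(count)
--
--     # Check if any delimiter appears consistently
--     for delim, counts in delimiter_counts.items():
--         if len(counts) > 5:
--             # Check consistency
--             if len(set(counts)) == 1 or (max(counts) - min(counts)) <= 1: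
--                 return True
--     return False
-- ===== SOURCE B (Python) =====
-- def _check_tabular(lines):
--     """Check for tabular structure"""
--     head = lines[:50]
--     for delim in [',', '\t', '|', ';']:
--         n = 0
--         lo = hi = None
--         for line in head:
--             if line.strip():
--                 c = line.count(delim)
--                 if c > 0:
--                     n += 1
--                     lo = c if lo is None else min(lo, c)
--                     hi = c if hi is None else max(hi, c)
--         if n > 5 and hi - lo <= 1:
--             return True
--     return False
-- ===== Notes on version B (the rewrite author's own statement) =====
-- stated objective: alternative
-- what changed: Replaced the defaultdict of per-line count lists plus a set/max/min post-pass with a delimiter-outer scan keeping only running (count-of-lines, min, max) aggregates per delimiter, the redundant len(set)==1 test collapsed into the single range check.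
import Mathlib
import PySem

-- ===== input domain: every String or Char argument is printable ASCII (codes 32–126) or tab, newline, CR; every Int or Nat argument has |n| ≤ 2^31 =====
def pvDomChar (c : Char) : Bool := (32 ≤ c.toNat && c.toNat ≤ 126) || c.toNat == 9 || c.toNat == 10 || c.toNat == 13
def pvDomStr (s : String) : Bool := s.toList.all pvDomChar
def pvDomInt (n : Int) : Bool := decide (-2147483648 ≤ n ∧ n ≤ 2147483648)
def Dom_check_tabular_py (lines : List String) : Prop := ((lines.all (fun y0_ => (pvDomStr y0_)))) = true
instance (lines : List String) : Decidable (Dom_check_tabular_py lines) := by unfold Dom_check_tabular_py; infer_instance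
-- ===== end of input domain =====

-- B replaces A's defaultdict of per-line count lists (and its set/max/min post-pass) by a
-- delimiter-outer scan keeping running (n, min, max) aggregates; same result, O(1) extra space.

-- ===== PORT A =====
-- body of A's 'for line in lines[:50]' loop: the inner 'for delim in [...]' loop updating the defaultdict
def checkTabularStep (d : PySem.Dict String (List Int)) (line : String) : PySem.Dict String (List Int) :=
  if PySem.Str.strip line ≠ "" then
    [",", "\t", "|", ";"].foldl
      (fun d delim =>
        let count := PySem.Str.count line delim
        if count > 0 then d.modify delim [] (fun l => l ++ [(count : Int)]) else d) d
  else d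

def check_tabular_py (lines : List String) : Bool :=
  let dc := (PySem.List.slice lines none (some 50)).foldl checkTabularStep PySem.Dict.empty
  dc.items.any (fun p =>
    let counts := p.2
    if counts.length > 5 then
      ((PySem.Set.ofList counts).length == 1) ||
      (match PySem.List.max? counts (fun x => x), PySem.List.min? counts (fun x => x) with
       | some mx, some mn => decide (mx - mn ≤ 1)
       | _, _ => false)
    else false)

-- ===== PORT B =====
-- body of B's inner 'for line in head' loop: update the running (n, lo, hi) aggregate
def checkTabularAltStep (delim : String) (st : Int × Option Int × Option Int) (line : String) :
    Int × Option Int × Option Int :=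
  if PySem.Str.strip line ≠ "" then
    let c : Int := (PySem.Str.count line delim : Int)
    if c > 0 then
      (st.1 + 1,
       some (match st.2.1 with | none => c | some lo => min lo c),
       some (match st.2.2 with | none => c | some hi => max hi c))
    else st
  else st

def check_tabular_py_alt (lines : List String) : Bool :=
  let head := PySem.List.slice lines none (some 50)
  [",", "\t", "|", ";"].any (fun delim =>
    let st := head.foldl (checkTabularAltStep delim) (0, none, none)
    st.1 > 5 && (match st.2.1 with
                 | some lo => (match st.2.2 with
                               | some hi => decide (hi - lo ≤ 1)
                               | none => false)
                 | none => false))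

-- ===== PRECONDITION & SPEC =====
def Spec_check_tabular_py (lines : List String) (out : Bool) : Prop := out = check_tabular_py_alt lines
instance (lines : List String) (out : Bool) : Decidable (Spec_check_tabular_py lines out) := by unfold Spec_check_tabular_py; infer_instance

-- ===== CLAIM (what is proved, stated in full; the proofs are below) =====
def Claim_equal_check_tabular_py : Prop := ∀ (lines : List String), Dom_check_tabular_py lines → Spec_check_tabular_py lines (check_tabular_py lines)

-- ===== LEMMAS AND PROOFS =====

-- proof-only helpers
def pvDelims : List String := [",", "\t", "|", ";"]

def pvCnt (line delim : String) : Option Int :=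
  if 0 < PySem.Str.count line delim then some ((PySem.Str.count line delim : Int)) else none

def pvLinePairs (line : String) : List (String × Int) :=
  if PySem.Str.strip line ≠ "" then
    pvDelims.filterMap (fun d => (pvCnt line d).map (fun c => (d, c)))
  else []

def pvCounts (head : List String) (k : String) : List Int :=
  ((head.flatMap pvLinePairs).filter (fun p => p.1 == k)).map (·.2)

def pvMinO (cs : List Int) : Option Int := match cs with | [] => none | x :: t => some (t.foldl min x)
def pvMaxO (cs : List Int) : Option Int := match cs with | [] => none | x :: t => some (t.foldl max x)

def pvP (counts : List Int) : Bool :=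
    if counts.length > 5 then
      ((PySem.Set.ofList counts).length == 1) ||
      (match PySem.List.max? counts (fun x => x), PySem.List.min? counts (fun x => x) with
       | some mx, some mn => decide (mx - mn ≤ 1)
       | _, _ => false)
    else false

-- A's per-line dict update equals folding the line's delimiter/count pairs
theorem pvStepA_eq (d : PySem.Dict String (List Int)) (line : String) :
    checkTabularStep d line
    = (pvLinePairs line).foldl (fun d p => d.modify p.1 [] (fun l => l ++ [p.2])) d := by
  unfold checkTabularStep
  by_cases h : PySem.Str.strip line ≠ ""
  · simp only [h, pvLinePairs, pvDelims, pvCnt, List.filterMap, List.foldl]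
    split_ifs <;> simp [List.foldl]
  · simp [pvLinePairs, h]

theorem pvFoldA (head : List String) (d : PySem.Dict String (List Int)) :
    head.foldl checkTabularStep d
    = (head.flatMap pvLinePairs).foldl (fun d p => d.modify p.1 [] (fun l => l ++ [p.2])) d := by
  induction head generalizing d with
  | nil => rfl
  | cons line rest ih =>
      rw [List.foldl_cons, List.flatMap_cons, List.foldl_append, ih, pvStepA_eq]

theorem pvMinO_append (cs : List Int) (c : Int) :
    pvMinO (cs ++ [c]) = some (match pvMinO cs with | none => c | some lo => min lo c) := by
  cases cs with
  | nil => rfl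
  | cons x t => simp [pvMinO, List.foldl_append]

theorem pvMaxO_append (cs : List Int) (c : Int) :
    pvMaxO (cs ++ [c]) = some (match pvMaxO cs with | none => c | some hi => max hi c) := by
  cases cs with
  | nil => rfl
  | cons x t => simp [pvMaxO, List.foldl_append]

-- one delimiter's contribution of a single line
def pvContrib (delim line : String) : List Int :=
  if PySem.Str.strip line ≠ "" then (pvCnt line delim).toList else []

theorem pvFoldB_spec (delim : String) (head : List String) :
    ∀ (n : Int) (cs : List Int),
    head.foldl (checkTabularAltStep delim) (n, pvMinO cs, pvMaxO cs)
    = (n + ((head.flatMap (pvContrib delim)).length : Int),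
       pvMinO (cs ++ head.flatMap (pvContrib delim)),
       pvMaxO (cs ++ head.flatMap (pvContrib delim))) := by
  induction head with
  | nil => intro n cs; simp
  | cons line rest ih =>
      intro n cs
      rw [List.foldl_cons, List.flatMap_cons]
      by_cases h : PySem.Str.strip line ≠ ""
      · by_cases hc : 0 < PySem.Str.count line delim
        · have hcI : ((PySem.Str.count line delim : Int)) > 0 := by exact_mod_cast hc
          have hcC : ¬ PySem.Chars.count line.toList delim.toList = 0 := by simpa using hc.ne'
          have hstep : checkTabularAltStep delim (n, pvMinO cs, pvMaxO cs) line
              = (n + 1, pvMinO (cs ++ [(PySem.Str.count line delim : Int)]),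
                 pvMaxO (cs ++ [(PySem.Str.count line delim : Int)])) := by
            simp [checkTabularAltStep, h, hcI, hcC, pvMinO_append, pvMaxO_append]
          rw [hstep, ih (n + 1) (cs ++ [(PySem.Str.count line delim : Int)])]
          have hcontrib : pvContrib delim line = [(PySem.Str.count line delim : Int)] := by
            simp [pvContrib, pvCnt, h, hc, hcC]
          rw [hcontrib]
          simp only [List.singleton_append, List.length_cons, List.append_assoc]
          refine Prod.ext ?_ rfl
          push_cast
          ring
        · have hc0 : PySem.Str.count line delim = 0 := by omega
          have hc0C : PySem.Chars.count line.toList delim.toList = 0 := by simpa using hc0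
          have hstep : checkTabularAltStep delim (n, pvMinO cs, pvMaxO cs) line
              = (n, pvMinO cs, pvMaxO cs) := by
            simp [checkTabularAltStep, h, hc0C]
          rw [hstep, ih n cs]
          have hcontrib : pvContrib delim line = [] := by simp [pvContrib, pvCnt, h, hc0C]
          rw [hcontrib]
          simp
      · have hstep : checkTabularAltStep delim (n, pvMinO cs, pvMaxO cs) line
            = (n, pvMinO cs, pvMaxO cs) := by
          simp [checkTabularAltStep, h]
        rw [hstep, ih n cs]
        have hcontrib : pvContrib delim line = [] := by simp [pvContrib, h]
        rw [hcontrib]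
        simp

-- relating pvCounts to pvContrib for a delimiter from the scanned list
theorem pvLine_filter (delim line : String) (hmem : delim ∈ pvDelims) :
    ((pvLinePairs line).filter (fun p => p.1 == delim)).map (·.2) = pvContrib delim line := by
  unfold pvLinePairs pvContrib
  by_cases h : PySem.Str.strip line ≠ ""
  · rw [if_pos h, if_pos h]
    fin_cases hmem <;>
      · simp only [pvDelims, pvCnt, List.filterMap]
        split_ifs <;> simp_all
  · simp [h]

theorem pvCounts_eq (delim : String) (hmem : delim ∈ pvDelims) (head : List String) :
    pvCounts head delim = head.flatMap (pvContrib delim) := by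
  induction head with
  | nil => rfl
  | cons line rest ih =>
      simp only [pvCounts, List.flatMap_cons, List.filter_append, List.map_append] at *
      rw [ih, pvLine_filter delim line hmem]

-- all-equal lists have trivial running extrema
theorem pvFoldl_min_const (x : Int) (t : List Int) (h : ∀ y ∈ t, y = x) : t.foldl min x = x := by
  induction t with
  | nil => rfl
  | cons y t ih =>
      have hy := h y (by simp)
      simp only [List.foldl_cons, hy, min_self]
      exact ih (fun z hz => h z (by simp [hz]))

theorem pvFoldl_max_const (x : Int) (t : List Int) (h : ∀ y ∈ t, y = x) : t.foldl max x = x := by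
  induction t with
  | nil => rfl
  | cons y t ih =>
      have hy := h y (by simp)
      simp only [List.foldl_cons, hy, max_self]
      exact ih (fun z hz => h z (by simp [hz]))

theorem pvP_eq (cs : List Int) :
    pvP cs = (decide (((cs.length : Int)) > 5) &&
      (match pvMinO cs, pvMaxO cs with
       | some lo, some hi => decide (hi - lo ≤ 1)
       | _, _ => false)) := by
  cases cs with
  | nil => simp [pvP, pvMinO, pvMaxO]
  | cons x t =>
      by_cases hlen : (x :: t).length > 5
      · have hlenI : (((x :: t).length : Int)) > 5 := by exact_mod_cast hlen
        simp only [pvP, hlen, if_true, hlenI, decide_true, Bool.true_and,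
          PySem.List.max?_id_cons, PySem.List.min?_id_cons, pvMinO, pvMaxO]
        by_cases hset : (PySem.Set.ofList (x :: t)).length = 1
        · obtain ⟨a, ha⟩ := List.length_eq_one_iff.mp hset
          have hall : ∀ y ∈ x :: t, y = a := by
            intro y hy
            have : y ∈ PySem.Set.ofList (x :: t) := (PySem.Set.mem_ofList _ _).mpr hy
            rw [ha] at this; simpa using this
          have hx : x = a := hall x (by simp)
          have hmin : t.foldl min x = x := pvFoldl_min_const x t (fun y hy => (hall y (by simp [hy])).trans hx.symm)
          have hmax : t.foldl max x = x := pvFoldl_max_const x t (fun y hy => (hall y (by simp [hy])).trans hx.symm)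
          simp [hset, hmin, hmax]
        · simp [hset]
      · have hlenI : ¬ (((x :: t).length : Int)) > 5 := by exact_mod_cast hlen
        simp only [pvP, if_neg hlen, decide_eq_false hlenI, Bool.false_and]

theorem pvP_len (cs : List Int) (h : pvP cs = true) : 5 < cs.length := by
  by_contra hc
  simp [pvP, hc] at h

theorem pvMem_linePairs (p : String × Int) (line : String) (h : p ∈ pvLinePairs line) :
    p.1 ∈ pvDelims := by
  unfold pvLinePairs at h
  split at h
  · obtain ⟨d, hd, hsome⟩ := List.mem_filterMap.mp h
    cases hcnt : pvCnt line d with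
    | none => simp [hcnt] at hsome
    | some c =>
        simp only [hcnt, Option.map_some] at hsome
        have hp : (d, c) = p := Option.some.inj hsome
        rw [← hp]
        exact hd
  · simp at h

theorem pvAny_congr (l : List String) (p q : String → Bool) (h : ∀ x ∈ l, p x = q x) :
    l.any p = l.any q := by
  induction l with
  | nil => rfl
  | cons x t ih => simp [List.any_cons, h x (by simp), ih (fun y hy => h y (by simp [hy]))]

theorem pvA_eq (head : List String) :
    ((head.foldl checkTabularStep PySem.Dict.empty).items.any (fun p =>
      let counts := p.2
      if counts.length > 5 then
        ((PySem.Set.ofList counts).length == 1) ||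
        (match PySem.List.max? counts (fun x => x), PySem.List.min? counts (fun x => x) with
         | some mx, some mn => decide (mx - mn ≤ 1)
         | _, _ => false)
      else false))
    = pvDelims.any (fun k => pvP (pvCounts head k)) := by
  rw [pvFoldA]
  have hnd : ((head.flatMap pvLinePairs).foldl
      (fun d p => d.modify p.1 [] (fun l => l ++ [p.2])) PySem.Dict.empty).keys.Nodup :=
    PySem.Dict.nodup_keys_foldl_modify_key _ _ _ _ _ PySem.Dict.nodup_keys_empty
  have hkeys : ((head.flatMap pvLinePairs).foldl
      (fun d p => d.modify p.1 [] (fun l => l ++ [p.2])) PySem.Dict.empty).keys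
      = PySem.Set.ofList ((head.flatMap pvLinePairs).map (·.1)) := by
    rw [PySem.Dict.keys_foldl_modify_key]
    rfl
  have hgd : ∀ k, ((head.flatMap pvLinePairs).foldl
      (fun d p => d.modify p.1 [] (fun l => l ++ [p.2])) PySem.Dict.empty).getD k []
      = pvCounts head k := by
    intro k
    rw [PySem.Dict.getD_foldl_modify_append]
    simp [pvCounts, PySem.Dict.getD_empty]
  rw [Bool.eq_iff_iff]
  simp only [List.any_eq_true]
  constructor
  · rintro ⟨⟨k, v⟩, hp, hpred⟩
    refine ⟨k, ?_, ?_⟩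
    · have h1 := PySem.Dict.mem_keys_of_mem_items _ hp
      rw [hkeys] at h1
      have h2 := (PySem.Set.mem_ofList _ _).mp h1
      obtain ⟨q, hq, hq1⟩ := List.mem_map.mp h2
      obtain ⟨line, hline, hqline⟩ := List.mem_flatMap.mp hq
      have hq1' : q.1 = k := hq1
      rw [← hq1']
      exact pvMem_linePairs q line hqline
    · have h2 : ((head.flatMap pvLinePairs).foldl
          (fun d p => d.modify p.1 [] (fun l => l ++ [p.2])) PySem.Dict.empty).getD k [] = v :=
        PySem.Dict.getD_of_mem_items _ hp hnd []
      have h3 : pvCounts head k = v := (hgd k).symm.trans h2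
      rw [h3]
      exact hpred
  · rintro ⟨delim, hdel, hP⟩
    have hlen := pvP_len _ hP
    have hne : pvCounts head delim ≠ [] := by
      intro h0
      rw [h0] at hlen
      simp at hlen
    have hkmem : delim ∈ (head.flatMap pvLinePairs).map (·.1) := by
      unfold pvCounts at hne
      rcases hq : ((head.flatMap pvLinePairs).filter (fun p => p.1 == delim)) with _ | ⟨q, qs⟩
      · rw [hq] at hne
        simp at hne
      · have hqmem : q ∈ (head.flatMap pvLinePairs).filter (fun p => p.1 == delim) := by
          rw [hq]; simp
        have := List.mem_filter.mp hqmem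
        refine List.mem_map.mpr ⟨q, this.1, ?_⟩
        simpa using this.2
    have hkey : delim ∈ ((head.flatMap pvLinePairs).foldl
        (fun d p => d.modify p.1 [] (fun l => l ++ [p.2])) PySem.Dict.empty).keys := by
      rw [hkeys]
      exact (PySem.Set.mem_ofList _ _).mpr hkmem
    refine ⟨(delim, pvCounts head delim), ?_, hP⟩
    apply PySem.Dict.mem_items_of_get?_eq_some
    cases hget : ((head.flatMap pvLinePairs).foldl
        (fun d p => d.modify p.1 [] (fun l => l ++ [p.2])) PySem.Dict.empty).get? delim with
    | none =>
        exact absurd hkey ((PySem.Dict.get?_eq_none_iff_not_mem_keys _ _).mp hget)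
    | some v =>
        have h2 := PySem.Dict.getD_of_get?_eq_some _ ([] : List Int) hget
        rw [hgd delim] at h2
        rw [h2]

theorem pvB_eq (head : List String) :
    ([",", "	", "|", ";"].any (fun delim =>
      let st := head.foldl (checkTabularAltStep delim) (0, none, none)
      st.1 > 5 && (match st.2.1 with
                   | some lo => (match st.2.2 with
                                 | some hi => decide (hi - lo ≤ 1)
                                 | none => false)
                   | none => false)))
    = pvDelims.any (fun k => pvP (pvCounts head k)) := by
  apply pvAny_congr
  intro delim hmem
  have hfold : head.foldl (checkTabularAltStep delim) (0, none, none)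
      = (0 + ((head.flatMap (pvContrib delim)).length : Int),
         pvMinO ([] ++ head.flatMap (pvContrib delim)),
         pvMaxO ([] ++ head.flatMap (pvContrib delim))) := pvFoldB_spec delim head 0 []
  simp only [List.nil_append, zero_add] at hfold
  rw [hfold, ← pvCounts_eq delim hmem head, pvP_eq]
  rcases pvMinO (pvCounts head delim) with _ | lo <;> rcases pvMaxO (pvCounts head delim) with _ | hi <;> rfl

theorem check_tabular_py_spec_aux : ∀ (lines : List String), check_tabular_py lines = check_tabular_py_alt lines := by
  intro lines
  show ((PySem.List.slice lines none (some 50)).foldl checkTabularStep PySem.Dict.empty).items.any (fun p =>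
      let counts := p.2
      if counts.length > 5 then
        ((PySem.Set.ofList counts).length == 1) ||
        (match PySem.List.max? counts (fun x => x), PySem.List.min? counts (fun x => x) with
         | some mx, some mn => decide (mx - mn ≤ 1)
         | _, _ => false)
      else false)
    = [",", "	", "|", ";"].any (fun delim =>
      let st := (PySem.List.slice lines none (some 50)).foldl (checkTabularAltStep delim) (0, none, none)
      st.1 > 5 && (match st.2.1 with
                   | some lo => (match st.2.2 with
                                 | some hi => decide (hi - lo ≤ 1)
                                 | none => false)
                   | none => false))
  rw [pvA_eq, pvB_eq]

-- ===== VERDICT (by name: the statement is the Claim_ definition above) =====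
theorem check_tabular_py_spec : Claim_equal_check_tabular_py := by
  intro lines _
  unfold Spec_check_tabular_py
  exact check_tabular_py_spec_aux lines
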